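-- pv_equiv track=rewrite | github.com/s-ilioukhina/tetris-genetic-algorithm | main.py | emptyRowsAndColumns
-- ===== SOURCE A (Python) =====
-- def emptyRowsAndColumns(grid):
-- 	emptyLine = 0
-- 	for rown in range(len(grid)):
-- 		if sum(grid[rown]) == 0:
-- 			emptyLine += 1
--
-- 	for coln in range(len(grid[0])):
-- 		if sum(grid[i][coln] for i in range(len(grid))) == 0:
-- 			emptyLine += 1
-- 	return emptyLine
-- ===== SOURCE B (Python) =====
-- def emptyRowsAndColumns(grid):
--     w = len(grid[0])
--     count = 0
--     colSums = [0] * w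
--     for row in grid:
--         if sum(row) == 0:
--             count += 1
--         colSums = [colSums[j] + row[j] for j in range(w)]
--     return count + colSums.count(0)
-- ===== Notes on version B (the rewrite author's own statement) =====
-- stated objective: simpler
-- what changed: Single pass over the rows maintaining a running vector of column sums (and the empty-row count), instead of A's second loop that rescans the whole grid once per column.
import Mathlib
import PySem

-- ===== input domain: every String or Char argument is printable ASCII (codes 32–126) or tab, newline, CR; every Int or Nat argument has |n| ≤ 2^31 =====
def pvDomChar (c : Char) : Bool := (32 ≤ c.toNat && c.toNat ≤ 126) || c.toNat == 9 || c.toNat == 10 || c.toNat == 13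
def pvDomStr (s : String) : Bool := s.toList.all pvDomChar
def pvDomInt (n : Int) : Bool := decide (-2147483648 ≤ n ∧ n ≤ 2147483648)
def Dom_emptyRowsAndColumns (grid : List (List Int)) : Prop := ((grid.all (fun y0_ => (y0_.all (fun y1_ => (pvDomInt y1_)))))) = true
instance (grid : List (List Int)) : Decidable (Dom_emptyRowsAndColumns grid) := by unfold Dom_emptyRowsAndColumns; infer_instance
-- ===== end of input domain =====

-- B replaces A's per-column rescans of the grid with one pass over the rows that maintains
-- a running vector of column sums (objective: simpler, one traversal).

-- ===== PORT A =====
-- grid[rown]/grid[0]/grid[i][coln] are ported with pyGetD; Pre_ keeps every index in range.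
def emptyRowsAndColumns (grid : List (List Int)) : Int :=
  let n : Int := grid.length
  let e1 : Int := (PySem.List.pyRange 0 n 1).foldl
    (fun acc rown => if (PySem.List.pyGetD grid rown []).sum = 0 then acc + 1 else acc) 0
  let w : Int := (PySem.List.pyGetD grid 0 ([] : List Int)).length
  (PySem.List.pyRange 0 w 1).foldl
    (fun acc coln =>
      if ((PySem.List.pyRange 0 n 1).foldl
            (fun s i => s + PySem.List.pyGetD (PySem.List.pyGetD grid i ([] : List Int)) coln 0) 0) = 0
      then acc + 1 else acc) e1

-- ===== PORT B =====
def emptyRowsAndColumns_alt (grid : List (List Int)) : Int :=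
  let w : Nat := (PySem.List.pyGetD grid 0 ([] : List Int)).length
  let st : Int × List Int := grid.foldl
    (fun st row =>
      ((if row.sum = 0 then st.1 + 1 else st.1),
       (List.range w).map (fun j => st.2.getD j 0 + PySem.List.pyGetD row (j : Int) 0)))
    (0, List.replicate w (0 : Int))
  st.1 + (st.2.count 0 : Int)

-- ===== PRECONDITION & SPEC =====
-- Pre_: grid is nonempty (Python's grid[0] raises IndexError on []) and no row is shorter than
-- row 0 (grid[i][coln] raises IndexError for a ragged shorter row).
def Pre_emptyRowsAndColumns (grid : List (List Int)) : Prop :=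
  grid ≠ [] ∧ ∀ row ∈ grid, (grid.headD []).length ≤ row.length
instance (grid : List (List Int)) : Decidable (Pre_emptyRowsAndColumns grid) := by
  unfold Pre_emptyRowsAndColumns; infer_instance
def pvWitness_emptyRowsAndColumns : List (List Int) := [[0, 1], [2, -2]]

def Spec_emptyRowsAndColumns (grid : List (List Int)) (out : Int) : Prop := out = emptyRowsAndColumns_alt grid
instance (grid : List (List Int)) (out : Int) : Decidable (Spec_emptyRowsAndColumns grid out) := by unfold Spec_emptyRowsAndColumns; infer_instance

-- ===== CLAIM (what is proved, stated in full; the proofs are below) =====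
def Claim_equal_emptyRowsAndColumns : Prop := ∀ (grid : List (List Int)), Dom_emptyRowsAndColumns grid → Pre_emptyRowsAndColumns grid → Spec_emptyRowsAndColumns grid (emptyRowsAndColumns grid)

-- ===== LEMMAS AND PROOFS =====

-- the column sum that both programs compute, as a function of the column index
def pvColSum (grid : List (List Int)) (j : Nat) : Int :=
  (grid.map (fun row => row.getD j 0)).sum

-- B's fold, first component: the running empty-row count
theorem pv_alt_fst (grid : List (List Int)) (w : Nat) (c : Int) (cs : List Int) :
    (grid.foldl
      (fun st row =>
        ((if row.sum = 0 then st.1 + 1 else st.1),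
         (List.range w).map (fun j => st.2.getD j 0 + PySem.List.pyGetD row (j : Int) 0)))
      (c, cs)).1
    = grid.foldl (fun acc row => if row.sum = 0 then acc + 1 else acc) c := by
  induction grid generalizing c cs with
  | nil => rfl
  | cons r t ih => rw [List.foldl_cons]; exact ih _ _

-- B's fold, second component: entry j accumulates the column sum over the processed rows
theorem pv_alt_snd (grid : List (List Int)) (w : Nat) (c : Int) (cs : List Int)
    (hcs : cs = (List.range w).map fun j => cs.getD j 0) :
    (grid.foldl
      (fun st row =>
        ((if row.sum = 0 then st.1 + 1 else st.1),
         (List.range w).map (fun j => st.2.getD j 0 + PySem.List.pyGetD row (j : Int) 0)))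
      (c, cs)).2
    = (List.range w).map (fun j => cs.getD j 0 + pvColSum grid j) := by
  induction grid generalizing c cs with
  | nil =>
    simp only [List.foldl_nil, pvColSum, List.map_nil, List.sum_nil, add_zero]
    exact hcs
  | cons r t ih =>
    simp only [List.foldl_cons]
    rw [ih]
    · refine List.map_congr_left (fun j hj => ?_)
      simp only [List.mem_range] at hj
      have : ((List.range w).map fun j => cs.getD j 0 + PySem.List.pyGetD r (j : Int) 0).getD j 0
          = cs.getD j 0 + PySem.List.pyGetD r (j : Int) 0 := by
        simp [List.getD_eq_getElem?_getD, hj]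
      rw [this]
      simp only [pvColSum, List.map_cons, List.sum_cons, PySem.List.pyGetD_natCast]
      ring
    · refine List.ext_getElem (by simp) (fun i h1 h2 => ?_)
      simp [List.getD_eq_getElem?_getD, (by simpa using h1 : i < w)]

-- counting loop: the if-accumulator over a range equals the count of zeros among the images
theorem pv_count_loop (l : List Nat) (g : Nat → Int) (e : Int) :
    l.foldl (fun acc j => if g j = 0 then acc + 1 else acc) e
    = e + ((l.map g).count 0 : Int) := by
  induction l generalizing e with
  | nil => simp
  | cons x t ih =>
    simp only [List.foldl_cons, List.map_cons, ih]
    by_cases h : g x = 0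
    · simp [h]; omega
    · simp [h]

theorem emptyRowsAndColumns_eq (grid : List (List Int)) :
    emptyRowsAndColumns grid = emptyRowsAndColumns_alt grid := by
  unfold emptyRowsAndColumns emptyRowsAndColumns_alt
  simp only []
  rw [PySem.List.foldl_pyRange_zero_pyGetD' grid ([] : List Int)
        (fun acc row => if row.sum = 0 then acc + 1 else acc) 0]
  rw [pv_alt_fst, pv_alt_snd]
  · have hin : ∀ coln : Int, (PySem.List.pyRange 0 (grid.length : Int) 1).foldl
        (fun s i => s + PySem.List.pyGetD (PySem.List.pyGetD grid i ([] : List Int)) coln 0) 0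
        = grid.foldl (fun s row => s + PySem.List.pyGetD row coln 0) 0 := by
      intro coln
      exact PySem.List.foldl_pyRange_zero_pyGetD' grid ([] : List Int)
        (fun s row => s + PySem.List.pyGetD row coln 0) 0
    have hrange : PySem.List.pyRange 0 ((PySem.List.pyGetD grid 0 ([] : List Int)).length : Int) 1
        = (List.range (PySem.List.pyGetD grid 0 ([] : List Int)).length).map (fun k : Nat => (k : Int)) := by
      rw [PySem.List.pyRange_one]
      simp
    rw [hrange, List.foldl_map]
    have hcol : ∀ j : Nat, grid.foldl (fun s row => s + PySem.List.pyGetD row ((j : Nat) : Int) 0) 0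
        = pvColSum grid j := by
      intro j
      simp only [PySem.List.pyGetD_natCast, pvColSum]
      rw [List.sum_eq_foldl, List.foldl_map]
    have hfun : (fun (acc : Int) (j : Nat) =>
        if (PySem.List.pyRange 0 (grid.length : Int) 1).foldl
            (fun s i => s + PySem.List.pyGetD (PySem.List.pyGetD grid i ([] : List Int)) ((j : Nat) : Int) 0) 0 = 0
        then acc + 1 else acc)
        = fun acc j => if pvColSum grid j = 0 then acc + 1 else acc := by
      funext acc j
      rw [hin, hcol]
    rw [hfun, pv_count_loop]
    have hmap : (List.range (PySem.List.pyGetD grid 0 ([] : List Int)).length).map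
          (fun j => (List.replicate (PySem.List.pyGetD grid 0 ([] : List Int)).length (0 : Int)).getD j 0
            + pvColSum grid j)
        = (List.range (PySem.List.pyGetD grid 0 ([] : List Int)).length).map (pvColSum grid) := by
      refine List.map_congr_left (fun j hj => ?_)
      simp only [List.mem_range] at hj
      rw [List.getD_eq_getElem?_getD]
      simp [hj]
    rw [hmap]
  · refine List.ext_getElem (by simp) (fun i h1 h2 => ?_)
    simp [List.getD_eq_getElem?_getD]

-- ===== VERDICT (by name: the statement is the Claim_ definition above) =====
theorem emptyRowsAndColumns_spec : Claim_equal_emptyRowsAndColumns := by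
  intro grid _ _
  unfold Spec_emptyRowsAndColumns
  exact emptyRowsAndColumns_eq grid
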